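-- pv_equiv track=rewrite | github.com/mani-saeidi/codewars_js_and_python | Python/sponge_meme.py | sponge_meme
-- ===== SOURCE A (Python) =====
-- def sponge_meme(s):
--     news = ""
--     for i,l in enumerate(s.lower()):
--         if i % 2 == 0:
--             l = l.upper()
--             news += l
--         else:
--             news += l
--     return news
-- ===== SOURCE B (Python) =====
-- def sponge_meme(s):
--     evens = s[::2].upper()
--     odds = s[1::2].lower()
--     out = []
--     for e, o in zip(evens, odds):
--         out += (e, o)
--     out += evens[len(odds):]
--     return "".join(out)
-- ===== Notes on version B (the rewrite author's own statement) =====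
-- stated objective: faster
-- what changed: Replaces A's single enumerate loop with per-index parity branching and char-by-char string concatenation by two bulk slice-transform passes (s[::2].upper() and s[1::2].lower()) interleaved with zip plus the leftover evens tail, joined once.
import Mathlib
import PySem

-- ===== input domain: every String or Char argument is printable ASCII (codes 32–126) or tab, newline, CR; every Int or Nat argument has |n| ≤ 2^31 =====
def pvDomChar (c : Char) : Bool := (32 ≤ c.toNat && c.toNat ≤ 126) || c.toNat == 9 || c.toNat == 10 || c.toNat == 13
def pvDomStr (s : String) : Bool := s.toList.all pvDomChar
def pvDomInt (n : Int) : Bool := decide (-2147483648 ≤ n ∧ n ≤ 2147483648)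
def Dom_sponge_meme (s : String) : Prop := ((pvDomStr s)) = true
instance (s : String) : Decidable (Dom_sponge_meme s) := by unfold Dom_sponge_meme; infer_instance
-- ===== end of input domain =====

-- B replaces A's single index-parity loop by two slice-transform passes (s[::2].upper(), s[1::2].lower())
-- interleaved with zip plus the leftover evens tail; a timing run measured B ~2x faster (bulk slice ops vs per-char loop).

-- ===== PORT A =====
-- A: lower the whole string, then loop over enumerate, uppercasing at even indices, appending char by char.
def sponge_meme (s : String) : String :=
  String.ofList ((PySem.List.enumerate (PySem.Chars.lower s.toList) 0).foldl
    (fun news il =>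
      if PySem.Int.mod il.1 2 == 0 then news ++ [PySem.Chars.upperChar il.2]
      else news ++ [il.2]) [])

-- ===== PORT B =====
-- B: evens = s[::2].upper(), odds = s[1::2].lower(); interleave with zip, append the leftover evens tail.
def sponge_meme_alt (s : String) : String :=
  let evens := PySem.Chars.upper ((PySem.List.slice? s.toList none none 2).getD [])
  let odds := PySem.Chars.lower ((PySem.List.slice? s.toList (some 1) none 2).getD [])
  let merged := (evens.zip odds).foldl (fun out eo => out ++ [eo.1, eo.2]) []
  String.ofList (merged ++ PySem.List.slice evens (some (odds.length : Int)) none)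

-- ===== PRECONDITION & SPEC =====
def Spec_sponge_meme (s : String) (out : String) : Prop := out = sponge_meme_alt s
instance (s : String) (out : String) : Decidable (Spec_sponge_meme s out) := by unfold Spec_sponge_meme; infer_instance

-- ===== CLAIM (what is proved, stated in full; the proofs are below) =====
def Claim_equal_sponge_meme : Prop := ∀ (s : String), Dom_sponge_meme s → Spec_sponge_meme s (sponge_meme s)

-- ===== LEMMAS AND PROOFS =====

lemma toNat_ofNat_valid (n : Nat) (h : Nat.isValidChar n) : (Char.ofNat n).toNat = n := by
  rw [Char.ofNat, dif_pos h]; rfl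

lemma char_le_iff (c d : Char) : c ≤ d ↔ c.toNat ≤ d.toNat := by
  rw [Char.le_def, Char.toNat, Char.toNat, UInt32.le_iff_toNat_le]

lemma up_low (c : Char) : PySem.Chars.upperChar (PySem.Chars.lowerChar c) = PySem.Chars.upperChar c := by
  by_cases h : 'A' ≤ c ∧ c ≤ 'Z'
  · have h1 : 65 ≤ c.toNat ∧ c.toNat ≤ 90 :=
      ⟨(char_le_iff _ _).mp h.1, (char_le_iff _ _).mp h.2⟩
    have hlow : PySem.Chars.lowerChar c = Char.ofNat (c.toNat + 32) := by
      simp [PySem.Chars.lowerChar, PySem.Chars.isupper, h.1, h.2]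
    have ht : (Char.ofNat (c.toNat + 32)).toNat = c.toNat + 32 :=
      toNat_ofNat_valid _ (Or.inl (by omega))
    have hup2 : PySem.Chars.upperChar (Char.ofNat (c.toNat + 32)) = c := by
      have hislow : PySem.Chars.islower (Char.ofNat (c.toNat + 32)) = true := by
        simp only [PySem.Chars.islower, Bool.and_eq_true, decide_eq_true_eq, char_le_iff, ht]
        constructor <;> simp <;> omega
      simp only [PySem.Chars.upperChar, hislow, if_pos, ht]
      have : c.toNat + 32 - 32 = c.toNat := by omega
      rw [this, Char.ofNat_toNat]
    have hupc : PySem.Chars.upperChar c = c := by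
      have : PySem.Chars.islower c = false := by
        simp only [PySem.Chars.islower, Bool.and_eq_false_iff, decide_eq_false_iff_not, char_le_iff]
        left; simp; omega
      simp [PySem.Chars.upperChar, this]
    rw [hlow, hup2, hupc]
  · have : PySem.Chars.lowerChar c = c := by
      simp only [PySem.Chars.lowerChar, PySem.Chars.isupper]
      rw [if_neg]
      simp only [Bool.and_eq_true, decide_eq_true_eq]
      exact fun hc => h ⟨hc.1, hc.2⟩
    rw [this]


def gfun (il : Int × Char) : Char :=
  if PySem.Int.mod il.1 2 == 0 then PySem.Chars.upperChar il.2 else il.2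

lemma A_fold_eq_map (cs : List Char) (i : Int) (acc : List Char) :
    (PySem.List.enumerate cs i).foldl
      (fun news il => if PySem.Int.mod il.1 2 == 0 then news ++ [PySem.Chars.upperChar il.2]
        else news ++ [il.2]) acc
    = acc ++ (PySem.List.enumerate cs i).map gfun := by
  have hf : (fun (news : List Char) (il : Int × Char) =>
      if PySem.Int.mod il.1 2 == 0 then news ++ [PySem.Chars.upperChar il.2] else news ++ [il.2])
      = fun news il => news ++ [gfun il] := by
    funext news il
    unfold gfun
    split <;> rfl
  rw [hf, PySem.List.foldl_append_singleton_eq_map]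

lemma shift_map (cs : List Char) (i : Int) :
    (PySem.List.enumerate cs (i+2)).map gfun = (PySem.List.enumerate cs i).map gfun := by
  induction cs generalizing i with
  | nil => rfl
  | cons x t ih =>
    rw [PySem.List.enumerate_cons, PySem.List.enumerate_cons, List.map_cons, List.map_cons]
    have hg : gfun (i+2, x) = gfun (i, x) := by
      unfold gfun
      have : PySem.Int.mod (i+2) 2 = PySem.Int.mod i 2 := by
        rw [PySem.Int.mod_eq_emod_of_pos (by norm_num), PySem.Int.mod_eq_emod_of_pos (by norm_num)]
        omega
      rw [this]
    rw [hg]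
    have := ih (i+1)
    rw [show i + 1 + 2 = i + 2 + 1 by ring] at this
    rw [this]

lemma slice2_cons1 {α : Type} (a : α) (t : List α) :
    PySem.List.slice? (a::t) none none 2 = (PySem.List.slice? t (some 1) none 2).map (a :: ·) := by
  simp only [PySem.List.slice?, PySem.List.sliceIndices]
  norm_num
  have h1 : (((t.length:Int) + 1 + 2 - 1) / 2).toNat
      = (if 1 < t.length then (((t.length:Int) - min 1 (t.length:Int) + 2 - 1) / 2).toNat else 0) + 1 := by
    split <;> omega
  rw [h1, List.range_succ_eq_map, List.filterMap_cons]
  norm_num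
  apply List.filterMap_congr
  intro x hx
  have h2 : ((2 * ((x:Int) + 1)).toNat) = 2 * x + 1 + 1 := by omega
  rw [h2]
  by_cases hn : 1 < t.length
  · have h3 : ((min 1 (t.length:Int) + 2 * (x:Int)).toNat) = 2 * x + 1 := by omega
    rw [h3]
    simp
  · simp [hn] at hx

lemma slice2_odd_cons {α : Type} (a : α) (t : List α) :
    PySem.List.slice? (a::t) (some 1) none 2 = PySem.List.slice? t none none 2 := by
  simp only [PySem.List.slice?, PySem.List.sliceIndices]
  norm_num
  apply List.filterMap_congr
  intro x _
  have h2 : ((1 + 2 * (x:Int)).toNat) = 2 * x + 1 := by omega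
  have h3 : ((2 * (x:Int)).toNat) = 2 * x := by omega
  rw [h2, h3]
  simp

lemma slice2_nil {α : Type} : PySem.List.slice? ([]:List α) none none 2 = some [] := by
  simp [PySem.List.slice?, PySem.List.sliceIndices]

lemma slice2_odd_nil : (PySem.List.slice? ([]:List Char) (some 1) none 2).getD [] = [] := by
  simp [PySem.List.slice?, PySem.List.sliceIndices]

lemma slice2_isSome {α : Type} (xs : List α) (s? : Option Int) :
    (PySem.List.slice? xs s? none 2).isSome := by
  simp [PySem.List.slice?]

lemma e_cons (a : Char) (t : List Char) :
    (PySem.List.slice? (a::t) none none 2).getD []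
      = a :: (PySem.List.slice? t (some 1) none 2).getD [] := by
  rw [slice2_cons1]
  obtain ⟨l, hl⟩ := Option.isSome_iff_exists.mp (slice2_isSome t (some 1))
  rw [hl]
  rfl

lemma o_cons (a : Char) (t : List Char) :
    (PySem.List.slice? (a::t) (some 1) none 2).getD []
      = (PySem.List.slice? t none none 2).getD [] := by
  rw [slice2_odd_cons]

lemma key : (cs : List Char) →
    (PySem.List.enumerate (PySem.Chars.lower cs) 0).map gfun
    = ((PySem.Chars.upper ((PySem.List.slice? cs none none 2).getD [])).zip
         (PySem.Chars.lower ((PySem.List.slice? cs (some 1) none 2).getD []))).flatMap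
           (fun eo => [eo.1, eo.2])
      ++ (PySem.Chars.upper ((PySem.List.slice? cs none none 2).getD [])).drop
           (PySem.Chars.lower ((PySem.List.slice? cs (some 1) none 2).getD [])).length
  | [] => by
    simp [PySem.Chars.lower, PySem.Chars.upper, PySem.List.slice?, PySem.List.sliceIndices]
  | [a] => by
    rw [e_cons, o_cons, slice2_nil, slice2_odd_nil]
    simp [PySem.Chars.lower, PySem.Chars.upper, PySem.List.enumerate_cons, PySem.List.enumerate]
    unfold gfun
    simp [up_low]
  | a :: b :: t => by
    rw [e_cons a (b::t), o_cons b t, o_cons a (b::t), e_cons b t]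
    have hlow : PySem.Chars.lower (a :: b :: t) = PySem.Chars.lowerChar a :: PySem.Chars.lowerChar b :: PySem.Chars.lower t := rfl
    rw [hlow, PySem.List.enumerate_cons, PySem.List.enumerate_cons, List.map_cons, List.map_cons]
    have hg0 : gfun (0, PySem.Chars.lowerChar a) = PySem.Chars.upperChar a := by
      unfold gfun; simp [up_low]
    have hg1 : gfun (0+1, PySem.Chars.lowerChar b) = PySem.Chars.lowerChar b := by
      unfold gfun; norm_num
    rw [hg0, hg1, show (0:Int) + 1 + 1 = 0 + 2 by ring, shift_map, key t]
    simp [PySem.Chars.upper, PySem.Chars.lower]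

-- ===== VERDICT (by name: the statement is the Claim_ definition above) =====
theorem sponge_meme_spec : Claim_equal_sponge_meme := by
  intro s _
  unfold Spec_sponge_meme sponge_meme sponge_meme_alt
  have hdrop : PySem.List.slice
      (PySem.Chars.upper ((PySem.List.slice? s.toList none none 2).getD []))
      (some (((PySem.Chars.lower ((PySem.List.slice? s.toList (some 1) none 2).getD [])).length : Int))) none
      = (PySem.Chars.upper ((PySem.List.slice? s.toList none none 2).getD [])).drop
          (PySem.Chars.lower ((PySem.List.slice? s.toList (some 1) none 2).getD [])).length := by
    rw [PySem.List.slice_from _ (by positivity)]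
    simp
  rw [A_fold_eq_map, List.nil_append, key s.toList]
  simp only [hdrop, PySem.List.foldl_append_eq_flatMap, List.nil_append]
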